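-- pv_equiv track=rewrite | github.com/Grigoriy1988/EGE | Варианты/03/Решение/23.py | f
-- ===== SOURCE A (Python) =====
-- def f(c,e,a1=False,a2=True):
--     if c == e:
--         return a1*a2
--     if c ==26:
--         a1 =True
--     if c == 12:
--         a2 =False
--     if c < e:
--         return 0
--     if c > e:
--         return f(c-2,e,a1,a2) +f(c//2,e,a1,a2)
-- ===== SOURCE B (Python) =====
-- def f(c, e, a1=False, a2=True):
--     # Bottom-up DP: avoid[k] = number of (-2, //2)-paths k -> e whose non-final
--     # nodes avoid 12; thru[k] = those that also pass 26 at a non-final node.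
--     if not a2:
--         return 0
--     if c == e:
--         return int(a1)
--     if c < e:
--         return 0
--     avoid = {e: 1}
--     thru = {e: 0}
--     for k in range(e + 1, c + 1):
--         if k == 12:
--             avoid[k] = 0
--             thru[k] = 0
--         else:
--             a = avoid.get(k - 2, 0) + avoid.get(k // 2, 0)
--             avoid[k] = a
--             thru[k] = a if k == 26 else thru.get(k - 2, 0) + thru.get(k // 2, 0)
--     return avoid[c] if a1 else thru[c]
-- ===== Notes on version B (the rewrite author's own statement) =====
-- stated objective: faster
-- what changed: Replaces A's exponential two-branch recursion by one bottom-up dynamic-programming pass that tabulates, for each value k from e up to c, the number of 12-avoiding (-2, //2)-paths to e and the number of those that also pass 26, factoring the two boolean flags out of the recursion.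
import Mathlib
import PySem

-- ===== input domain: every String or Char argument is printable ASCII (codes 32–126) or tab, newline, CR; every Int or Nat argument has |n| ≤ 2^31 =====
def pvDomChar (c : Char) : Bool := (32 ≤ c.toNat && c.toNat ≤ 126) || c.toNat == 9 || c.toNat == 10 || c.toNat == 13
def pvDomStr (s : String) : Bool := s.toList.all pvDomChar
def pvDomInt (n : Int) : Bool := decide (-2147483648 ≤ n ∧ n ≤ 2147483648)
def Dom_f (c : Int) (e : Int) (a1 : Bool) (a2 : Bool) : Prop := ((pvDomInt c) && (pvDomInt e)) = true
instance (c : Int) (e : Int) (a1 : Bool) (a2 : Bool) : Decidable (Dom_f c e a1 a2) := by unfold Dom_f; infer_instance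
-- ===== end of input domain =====

-- B replaces A's exponential recursion by one bottom-up DP pass over k = e..c (asymptotically faster).

-- ===== PORT A =====
-- fuel-based transliteration of A's recursion; on Pre_f the fuel (c-e).toNat+1 is always sufficient
def fRec : Nat → Int → Int → Bool → Bool → Int
  | 0, _, _, _, _ => 0
  | n+1, c, e, a1, a2 =>
    if c = e then (if a1 && a2 then 1 else 0)      -- return a1*a2
    else
      let a1' := a1 || decide (c = 26)             -- if c == 26: a1 = True
      let a2' := a2 && !(decide (c = 12))          -- if c == 12: a2 = False
      if c < e then 0
      else fRec n (c - 2) e a1' a2' + fRec n (PySem.Int.floordiv c 2) e a1' a2'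

def f (c : Int) (e : Int) (a1 : Bool) (a2 : Bool) : Int :=
  fRec ((c - e).toNat + 1) c e a1 a2

-- ===== PORT B =====
-- one loop step of Source B: (avoid, thru) dicts, key k
def bStep (st : PySem.Dict Int Int × PySem.Dict Int Int) (k : Int) :
    PySem.Dict Int Int × PySem.Dict Int Int :=
  if k = 12 then (st.1.insert k 0, st.2.insert k 0)
  else
    let a := st.1.getD (k - 2) 0 + st.1.getD (PySem.Int.floordiv k 2) 0
    (st.1.insert k a,
     st.2.insert k (if k = 26 then a
                    else st.2.getD (k - 2) 0 + st.2.getD (PySem.Int.floordiv k 2) 0))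

def f_alt (c : Int) (e : Int) (a1 : Bool) (a2 : Bool) : Int :=
  if a2 = false then 0
  else if c = e then (if a1 then 1 else 0)
  else if c < e then 0
  else
    let st := (PySem.List.pyRange (e + 1) (c + 1) 1).foldl bStep
                ((PySem.Dict.empty.insert e 1), (PySem.Dict.empty.insert e 0))
    -- Python's avoid[c] / thru[c]: the key c is always present here, so getD is exact
    if a1 then st.1.getD c 0 else st.2.getD c 0

-- ===== PRECONDITION & SPEC =====
-- Pre_f excludes exactly the inputs with e < c and e < 0, on which A recurses forever
-- through the //2 fixed points 0 and -1 and raises RecursionError (A never returns there).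
def Pre_f (c : Int) (e : Int) (a1 : Bool) (a2 : Bool) : Prop := c ≤ e ∨ 0 ≤ e
instance (c : Int) (e : Int) (a1 : Bool) (a2 : Bool) : Decidable (Pre_f c e a1 a2) := by unfold Pre_f; infer_instance
def pvWitness_f : Int × Int × Bool × Bool := (10, 2, false, true)

def Spec_f (c : Int) (e : Int) (a1 : Bool) (a2 : Bool) (out : Int) : Prop := out = f_alt c e a1 a2
instance (c : Int) (e : Int) (a1 : Bool) (a2 : Bool) (out : Int) : Decidable (Spec_f c e a1 a2 out) := by unfold Spec_f; infer_instance

-- ===== CLAIM (what is proved, stated in full; the proofs are below) =====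
def Claim_equal_f : Prop := ∀ (c : Int) (e : Int) (a1 : Bool) (a2 : Bool), Dom_f c e a1 a2 → Pre_f c e a1 a2 → Spec_f c e a1 a2 (f c e a1 a2)

-- ===== LEMMAS AND PROOFS =====

-- fueled versions of the two path counters (for proofs only)
def avF : Nat → Int → Int → Int
  | 0, _, _ => 0
  | n+1, k, e =>
    if k = e then 1 else if k < e then 0 else if k = 12 then 0
    else avF n (k - 2) e + avF n (PySem.Int.floordiv k 2) e

def thF : Nat → Int → Int → Int
  | 0, _, _ => 0
  | n+1, k, e =>
    if k = e then 0 else if k < e then 0 else if k = 12 then 0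
    else if k = 26 then avF n (k - 2) e + avF n (PySem.Int.floordiv k 2) e
    else thF n (k - 2) e + thF n (PySem.Int.floordiv k 2) e

def av (k e : Int) : Int := avF ((k - e).toNat + 1) k e
def th (k e : Int) : Int := thF ((k - e).toNat + 1) k e


lemma avF_succ (n : Nat) (k e : Int) : avF (n + 1) k e =
    (if k = e then 1 else if k < e then 0 else if k = 12 then 0
     else avF n (k - 2) e + avF n (PySem.Int.floordiv k 2) e) := rfl

lemma thF_succ (n : Nat) (k e : Int) : thF (n + 1) k e =
    (if k = e then 0 else if k < e then 0 else if k = 12 then 0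
     else if k = 26 then avF n (k - 2) e + avF n (PySem.Int.floordiv k 2) e
     else thF n (k - 2) e + thF n (PySem.Int.floordiv k 2) e) := rfl

lemma floordiv_two_lt (k : Int) (hk : 1 ≤ k) : PySem.Int.floordiv k 2 < k ∧ 0 ≤ PySem.Int.floordiv k 2 := by
  rw [PySem.Int.floordiv_eq_ediv_of_pos (by norm_num)]
  omega

lemma avF_stable (e : Int) (he : 0 ≤ e) :
    ∀ (d n m : Nat) (k : Int), (k - e).toNat ≤ d → d < n → d < m → avF n k e = avF m k e := by
  intro d
  induction d with
  | zero =>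
    intro n m k hk hn hm
    obtain ⟨n', rfl⟩ : ∃ n', n = n' + 1 := ⟨n - 1, by omega⟩
    obtain ⟨m', rfl⟩ : ∃ m', m = m' + 1 := ⟨m - 1, by omega⟩
    have : k ≤ e := by omega
    rw [avF_succ, avF_succ]
    split_ifs with h1 h2 <;> first | rfl | omega
  | succ d ih =>
    intro n m k hk hn hm
    obtain ⟨n', rfl⟩ : ∃ n', n = n' + 1 := ⟨n - 1, by omega⟩
    obtain ⟨m', rfl⟩ : ∃ m', m = m' + 1 := ⟨m - 1, by omega⟩
    rw [avF_succ, avF_succ]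
    split_ifs with h1 h2 h3
    · rfl
    · rfl
    · rfl
    · have hek : e < k := by omega
      have h2' := floordiv_two_lt k (by omega)
      have hq : (PySem.Int.floordiv k 2 - e).toNat ≤ d := by omega
      have hk2 : ((k - 2) - e).toNat ≤ d := by omega
      rw [ih n' m' (k - 2) hk2 (by omega) (by omega),
          ih n' m' (PySem.Int.floordiv k 2) hq (by omega) (by omega)]

lemma thF_stable (e : Int) (he : 0 ≤ e) :
    ∀ (d n m : Nat) (k : Int), (k - e).toNat ≤ d → d < n → d < m → thF n k e = thF m k e := by
  intro d
  induction d with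
  | zero =>
    intro n m k hk hn hm
    obtain ⟨n', rfl⟩ : ∃ n', n = n' + 1 := ⟨n - 1, by omega⟩
    obtain ⟨m', rfl⟩ : ∃ m', m = m' + 1 := ⟨m - 1, by omega⟩
    have : k ≤ e := by omega
    rw [thF_succ, thF_succ]
    split_ifs with h1 h2 <;> first | rfl | omega
  | succ d ih =>
    intro n m k hk hn hm
    obtain ⟨n', rfl⟩ : ∃ n', n = n' + 1 := ⟨n - 1, by omega⟩
    obtain ⟨m', rfl⟩ : ∃ m', m = m' + 1 := ⟨m - 1, by omega⟩
    rw [thF_succ, thF_succ]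
    split_ifs with h1 h2 h3 h4
    · rfl
    · rfl
    · rfl
    · have hek : e < k := by omega
      have h2' := floordiv_two_lt k (by omega)
      rw [avF_stable e he d n' m' (k - 2) (by omega) (by omega) (by omega),
          avF_stable e he d n' m' (PySem.Int.floordiv k 2) (by omega) (by omega) (by omega)]
    · have hek : e < k := by omega
      have h2' := floordiv_two_lt k (by omega)
      rw [ih n' m' (k - 2) (by omega) (by omega) (by omega),
          ih n' m' (PySem.Int.floordiv k 2) (by omega) (by omega) (by omega)]

lemma av_base (e : Int) : av e e = 1 := by simp [av, avF]

lemma th_base (e : Int) : th e e = 0 := by simp [th, thF]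

lemma av_lt (k e : Int) (h : k < e) : av k e = 0 := by
  have : (k - e).toNat = 0 := by omega
  simp [av, this, avF]
  omega

lemma th_lt (k e : Int) (h : k < e) : th k e = 0 := by
  have : (k - e).toNat = 0 := by omega
  simp [th, this, thF]
  omega

lemma av_12 (e : Int) (h : e < 12) : av 12 e = 0 := by
  have h1 : ((12 : Int) - e).toNat + 1 = ((12 - e).toNat) + 1 := rfl
  simp only [av, avF]
  obtain ⟨d, hd⟩ : ∃ d, ((12 : Int) - e).toNat = d + 1 := ⟨((12 : Int) - e).toNat - 1, by omega⟩
  rw [hd]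
  rw [avF_succ]
  split_ifs with h1 h2 <;> first | rfl | omega

lemma th_12 (e : Int) (h : e < 12) : th 12 e = 0 := by
  simp only [th]
  obtain ⟨d, hd⟩ : ∃ d, ((12 : Int) - e).toNat = d + 1 := ⟨((12 : Int) - e).toNat - 1, by omega⟩
  rw [hd]
  rw [thF_succ]
  split_ifs with h1 h2 <;> first | rfl | omega

lemma av_rec (k e : Int) (he : 0 ≤ e) (hk : e < k) (h12 : k ≠ 12) :
    av k e = av (k - 2) e + av (PySem.Int.floordiv k 2) e := by
  have h2' := floordiv_two_lt k (by omega)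
  simp only [av]
  obtain ⟨d, hd⟩ : ∃ d, (k - e).toNat = d + 1 := ⟨(k - e).toNat - 1, by omega⟩
  rw [hd]
  rw [avF_succ]
  rw [if_neg (by omega), if_neg (by omega), if_neg h12]
  rw [avF_stable e he ((k - 2 - e).toNat) (d + 1) ((k - 2 - e).toNat + 1) (k - 2) (le_refl _) (by omega) (by omega),
      avF_stable e he ((PySem.Int.floordiv k 2 - e).toNat) (d + 1) ((PySem.Int.floordiv k 2 - e).toNat + 1) (PySem.Int.floordiv k 2) (le_refl _) (by omega) (by omega)]

lemma th_rec (k e : Int) (he : 0 ≤ e) (hk : e < k) (h12 : k ≠ 12) :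
    th k e = if k = 26 then av (k - 2) e + av (PySem.Int.floordiv k 2) e
             else th (k - 2) e + th (PySem.Int.floordiv k 2) e := by
  have h2' := floordiv_two_lt k (by omega)
  simp only [th, av]
  obtain ⟨d, hd⟩ : ∃ d, (k - e).toNat = d + 1 := ⟨(k - e).toNat - 1, by omega⟩
  rw [hd]
  rw [thF_succ]
  rw [if_neg (by omega), if_neg (by omega), if_neg h12]
  split_ifs with h26
  · rw [avF_stable e he ((k - 2 - e).toNat) (d + 1) ((k - 2 - e).toNat + 1) (k - 2) (le_refl _) (by omega) (by omega),
        avF_stable e he ((PySem.Int.floordiv k 2 - e).toNat) (d + 1) ((PySem.Int.floordiv k 2 - e).toNat + 1) (PySem.Int.floordiv k 2) (le_refl _) (by omega) (by omega)]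
  · rw [thF_stable e he ((k - 2 - e).toNat) (d + 1) ((k - 2 - e).toNat + 1) (k - 2) (le_refl _) (by omega) (by omega),
        thF_stable e he ((PySem.Int.floordiv k 2 - e).toNat) (d + 1) ((PySem.Int.floordiv k 2 - e).toNat + 1) (PySem.Int.floordiv k 2) (le_refl _) (by omega) (by omega)]

-- A-side bridge: fRec computes the flag-factored counters, at the same fuel
lemma fRec_succ (n : Nat) (c e : Int) (a1 a2 : Bool) :
    fRec (n + 1) c e a1 a2 =
      (if c = e then (if a1 && a2 then 1 else 0)
       else if c < e then 0
       else fRec n (c - 2) e (a1 || decide (c = 26)) (a2 && !(decide (c = 12)))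
            + fRec n (PySem.Int.floordiv c 2) e (a1 || decide (c = 26)) (a2 && !(decide (c = 12)))) := rfl

lemma fRec_eq : ∀ (n : Nat) (c e : Int) (a1 a2 : Bool),
    fRec n c e a1 a2 = if a2 then (if a1 then avF n c e else thF n c e) else 0 := by
  intro n
  induction n with
  | zero => intro c e a1 a2; cases a1 <;> cases a2 <;> simp [fRec, avF, thF]
  | succ n ih =>
    intro c e a1 a2
    rw [fRec_succ, avF_succ, thF_succ]
    by_cases h1 : c = e
    · cases a1 <;> cases a2 <;> simp [h1]
    · by_cases h2 : c < e
      · cases a1 <;> cases a2 <;> simp [h1, h2]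
      · by_cases h12 : c = 12
        · cases a1 <;> cases a2 <;> simp [h1, h2, h12, ih]
        · by_cases h26 : c = 26
          · cases a1 <;> cases a2 <;> simp [h1, h2, h12, h26, ih]
          · cases a1 <;> cases a2 <;> simp [h1, h2, h12, h26, ih]

-- B-side loop invariant
lemma loop_inv (e : Int) (he : 0 ≤ e) : ∀ (m : Nat) (j : Int),
    (((PySem.List.pyRange (e + 1) (e + 1 + m) 1).foldl bStep
        ((PySem.Dict.empty.insert e 1), (PySem.Dict.empty.insert e 0))).1.getD j 0
      = if e ≤ j ∧ j ≤ e + m then av j e else 0) ∧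
    (((PySem.List.pyRange (e + 1) (e + 1 + m) 1).foldl bStep
        ((PySem.Dict.empty.insert e 1), (PySem.Dict.empty.insert e 0))).2.getD j 0
      = if e ≤ j ∧ j ≤ e + m then th j e else 0) := by
  intro m
  induction m with
  | zero =>
    intro j
    rw [PySem.List.pyRange_one_eq_nil (by omega)]
    simp only [List.foldl_nil]
    constructor <;>
    · rw [PySem.Dict.getD_insert]
      split_ifs with h1 h2 h2 <;>
        first
        | (subst h1; rw [av_base])
        | (subst h1; rw [th_base])
        | rfl
        | omega
        | (rw [PySem.Dict.getD_empty])
  | succ m ih =>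
    intro j
    have hsplit : e + 1 + ((m : Int) + 1) = (e + 1 + m) + 1 := by ring
    rw [show ((m + 1 : Nat) : Int) = (m : Int) + 1 by push_cast; ring, hsplit,
        PySem.List.pyRange_one_succ_right (by omega), List.foldl_append]
    set k : Int := e + 1 + m with hk
    have hek : e < k := by omega
    have h2' := floordiv_two_lt k (by omega)
    have hA2 := (ih (k - 2)).1
    have hAq := (ih (PySem.Int.floordiv k 2)).1
    have hT2 := (ih (k - 2)).2
    have hTq := (ih (PySem.Int.floordiv k 2)).2
    have havk2 : (((PySem.List.pyRange (e + 1) (e + 1 + m) 1).foldl bStep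
        ((PySem.Dict.empty.insert e 1), (PySem.Dict.empty.insert e 0))).1.getD (k - 2) 0) = av (k - 2) e := by
      rw [hA2]; split_ifs with h
      · rfl
      · rw [av_lt]; omega
    have havq : (((PySem.List.pyRange (e + 1) (e + 1 + m) 1).foldl bStep
        ((PySem.Dict.empty.insert e 1), (PySem.Dict.empty.insert e 0))).1.getD (PySem.Int.floordiv k 2) 0) = av (PySem.Int.floordiv k 2) e := by
      rw [hAq]; split_ifs with h
      · rfl
      · rw [av_lt]; omega
    have hthk2 : (((PySem.List.pyRange (e + 1) (e + 1 + m) 1).foldl bStep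
        ((PySem.Dict.empty.insert e 1), (PySem.Dict.empty.insert e 0))).2.getD (k - 2) 0) = th (k - 2) e := by
      rw [hT2]; split_ifs with h
      · rfl
      · rw [th_lt]; omega
    have hthq : (((PySem.List.pyRange (e + 1) (e + 1 + m) 1).foldl bStep
        ((PySem.Dict.empty.insert e 1), (PySem.Dict.empty.insert e 0))).2.getD (PySem.Int.floordiv k 2) 0) = th (PySem.Int.floordiv k 2) e := by
      rw [hTq]; split_ifs with h
      · rfl
      · rw [th_lt]; omega
    simp only [List.foldl_cons, List.foldl_nil, bStep]
    by_cases h12 : k = 12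
    · rw [if_pos h12]
      constructor
      · rw [PySem.Dict.getD_insert]
        split_ifs with hjk hin hin
        · subst hjk; rw [h12, av_12 e (by omega)]
        · rfl
        · rw [(ih j).1, if_pos (by omega)]
        · rw [(ih j).1, if_neg (by omega)]
      · rw [PySem.Dict.getD_insert]
        split_ifs with hjk hin hin
        · subst hjk; rw [h12, th_12 e (by omega)]
        · rfl
        · rw [(ih j).2, if_pos (by omega)]
        · rw [(ih j).2, if_neg (by omega)]
    · rw [if_neg h12]
      simp only
      constructor
      · rw [PySem.Dict.getD_insert, havk2, havq]
        by_cases hjk : j = k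
        · rw [if_pos hjk, hjk, if_pos (show e ≤ k ∧ k ≤ e + ((m : Int) + 1) by omega),
              av_rec k e he hek h12]
        · rw [if_neg hjk, (ih j).1]
          split_ifs with h1 h2 h2 <;> first | rfl | omega
      · rw [PySem.Dict.getD_insert, havk2, havq, hthk2, hthq]
        by_cases hjk : j = k
        · rw [if_pos hjk, hjk, if_pos (show e ≤ k ∧ k ≤ e + ((m : Int) + 1) by omega),
              th_rec k e he hek h12]
        · rw [if_neg hjk, (ih j).2]
          split_ifs with h1 h2 h2 <;> first | rfl | omega

-- ===== VERDICT (by name: the statement is the Claim_ definition above) =====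
theorem f_spec : Claim_equal_f := by
  intro c e a1 a2 _hdom hpre
  unfold Spec_f f f_alt
  rw [fRec_eq]
  by_cases ha2 : a2 = false
  · simp [ha2]
  · rw [if_neg ha2]
    have ha2' : a2 = true := by cases a2 <;> simp_all
    rw [if_pos ha2']
    have hfold : (if a1 = true then avF ((c - e).toNat + 1) c e else thF ((c - e).toNat + 1) c e)
        = (if a1 = true then av c e else th c e) := rfl
    rw [hfold]
    by_cases hce : c = e
    · subst hce
      rw [av_base, th_base]
      simp
    · rw [if_neg hce]
      by_cases hlt : c < e
      · rw [if_pos hlt, av_lt c e hlt, th_lt c e hlt]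
        cases a1 <;> simp
      · rw [if_neg hlt]
        have he : 0 ≤ e := by
          rcases hpre with h | h
          · omega
          · exact h
        have hec : e < c := by omega
        obtain ⟨m, hm⟩ : ∃ m : Nat, c + 1 = e + 1 + m := ⟨(c - e).toNat, by omega⟩
        rw [hm]
        have hinv := loop_inv e he m c
        have hcond : e ≤ c ∧ c ≤ e + (m : Int) := by omega
        simp only [hinv.1, hinv.2, if_pos hcond]
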